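-- pv_equiv track=rewrite | github.com/thaReal/MasterChef | codeforces/round_663/suborrays.py | solve
-- ===== SOURCE A (Python) =====
-- def solve(n):
-- 	nums = [str(x) for x in range(1,n+1)]
-- 	idx = n // 2
-- 	sol = []
-- 	sol.append(nums[idx])
--
-- 	i = 1
-- 	while len(sol) < n:
-- 		sol.append(nums[idx - i])
-- 		if len(sol) < n:
-- 			sol.append(nums[idx + i])
-- 		i += 1
--
-- 	return sol
-- ===== SOURCE B (Python) =====
-- def solve(n):
--     nums = [str(x) for x in range(1, n + 1)]
--     idx = n // 2
--     left = nums[:idx][::-1]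
--     right = nums[idx + 1:]
--     out = [nums[idx]]
--     for l, r in zip(left, right):
--         out.append(l)
--         out.append(r)
--     if len(right) < len(left):
--         out.append(left[-1])
--     return out
-- ===== Notes on version B (the rewrite author's own statement) =====
-- stated objective: idiomatic
-- what changed: Replaces the index-arithmetic while loop over a growing counter with slicing (reversed left half, right half) and a zip interleave plus one trailing element, the way an experienced Python developer would write it.
import Mathlib
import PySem

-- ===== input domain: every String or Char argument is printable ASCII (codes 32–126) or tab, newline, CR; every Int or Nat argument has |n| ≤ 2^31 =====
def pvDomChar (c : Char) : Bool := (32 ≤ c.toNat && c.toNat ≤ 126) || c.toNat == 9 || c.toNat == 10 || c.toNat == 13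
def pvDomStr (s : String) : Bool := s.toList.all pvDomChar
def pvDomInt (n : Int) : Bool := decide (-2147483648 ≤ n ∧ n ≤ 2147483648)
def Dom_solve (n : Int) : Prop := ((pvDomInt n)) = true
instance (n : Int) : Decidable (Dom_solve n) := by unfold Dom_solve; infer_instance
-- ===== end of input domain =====

-- B changes the decomposition only (slices + zip interleave instead of an index-walking while loop); equivalence claimed on n ≥ 1 (both Pythons raise IndexError otherwise).

-- ===== PORT A =====
-- while len(sol) < n: append nums[idx-i]; if len(sol) < n: append nums[idx+i]; i += 1
-- fuel bounds the iteration count (each iteration appends at least one element, so n.toNat suffices);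
-- pyGetD with default "" is only read in range under Pre_solve (n ≥ 1 makes every index in range).
def solveLoopA (nums : List String) (idx n : Int) (sol : List String) (i : Int) : Nat → List String
  | 0 => sol
  | fuel + 1 =>
    if (sol.length : Int) < n then
      let sol1 := sol ++ [PySem.List.pyGetD nums (idx - i) ""]
      let sol2 := if (sol1.length : Int) < n then sol1 ++ [PySem.List.pyGetD nums (idx + i) ""] else sol1
      solveLoopA nums idx n sol2 (i + 1) fuel
    else sol

def solve (n : Int) : List String :=
  let nums := (PySem.List.pyRange 1 (n + 1) 1).map PySem.Int.toStr
  let idx := PySem.Int.floordiv n 2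
  let sol := [PySem.List.pyGetD nums idx ""]
  solveLoopA nums idx n sol 1 n.toNat

-- ===== PORT B =====
def solve_alt (n : Int) : List String :=
  let nums := (PySem.List.pyRange 1 (n + 1) 1).map PySem.Int.toStr
  let idx := PySem.Int.floordiv n 2
  let left := (PySem.List.slice nums none (some idx)).reverse   -- nums[:idx][::-1]
  let right := PySem.List.slice nums (some (idx + 1)) none       -- nums[idx+1:]
  let out := [PySem.List.pyGetD nums idx ""]
  let out := (left.zip right).foldl (fun acc p => acc ++ [p.1, p.2]) out
  if right.length < left.length then out ++ [PySem.List.pyGetD left (-1) ""] else out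

-- ===== PRECONDITION & SPEC =====
-- Pre_ excludes exactly n ≤ 0, where both Pythons raise IndexError (nums[idx] with nums too short).
def Pre_solve (n : Int) : Prop := 1 ≤ n
instance (n : Int) : Decidable (Pre_solve n) := by unfold Pre_solve; infer_instance
def pvWitness_solve : Int := (5)
def Spec_solve (n : Int) (out : List String) : Prop := out = solve_alt n
instance (n : Int) (out : List String) : Decidable (Spec_solve n out) := by unfold Spec_solve; infer_instance

-- ===== CLAIM (what is proved, stated in full; the proofs are below) =====
def Claim_equal_solve : Prop := ∀ (n : Int), Dom_solve n → Pre_solve n → Spec_solve n (solve n)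

-- ===== LEMMAS AND PROOFS =====

-- proof-side helper: perfect interleave of L and R when |R| ≤ |L| ≤ |R| + 1
def pvInterleave : List String → List String → List String
  | [], ys => ys
  | x :: xs, ys => x :: pvInterleave ys xs
termination_by l r => l.length + r.length

theorem pvInterleave_nil_nil : pvInterleave [] [] = [] := by simp [pvInterleave]

theorem pvInterleave_cons_cons (x y : String) (xs ys : List String) :
    pvInterleave (x :: xs) (y :: ys) = x :: y :: pvInterleave xs ys := by
  rw [pvInterleave, pvInterleave]

-- the while loop of A produces sol ++ interleave L R, given that nums[idx∓(i+j)] are the elements of L/R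
theorem solveLoopA_eq (nums : List String) (idx n : Int) :
    ∀ (L R sol : List String) (i : Int) (fuel : Nat),
    R.length ≤ L.length → L.length ≤ R.length + 1 →
    (sol.length : Int) + L.length + R.length = n →
    L.length + R.length ≤ fuel →
    (∀ j : Nat, j < L.length → PySem.List.pyGetD nums (idx - (i + j)) "" = L.getD j "") →
    (∀ j : Nat, j < R.length → PySem.List.pyGetD nums (idx + (i + j)) "" = R.getD j "") →
    solveLoopA nums idx n sol i fuel = sol ++ pvInterleave L R := by
  intro L
  induction L with
  | nil =>
    intro R sol i fuel h1 h2 hlen hfuel _ _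
    have hR : R = [] := List.eq_nil_of_length_eq_zero (by
      have hnil : ([] : List String).length = 0 := rfl
      omega)
    subst hR
    simp only [List.length_nil, Nat.cast_zero, add_zero] at hlen
    have hnot : ¬ ((sol.length : Int) < n) := by omega
    cases fuel with
    | zero => simp [solveLoopA, pvInterleave_nil_nil]
    | succ f => rw [solveLoopA, if_neg hnot]; simp [pvInterleave_nil_nil]
  | cons x xs ih =>
    intro R sol i fuel h1 h2 hlen hfuel hL hR
    simp only [List.length_cons] at h2 hlen hfuel
    obtain ⟨f, rfl⟩ : ∃ f, fuel = f + 1 := ⟨fuel - 1, by omega⟩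
    have hlt : (sol.length : Int) < n := by push_cast at hlen; omega
    have hx : PySem.List.pyGetD nums (idx - i) "" = x := by
      have := hL 0 (by simp)
      simpa using this
    cases R with
    | nil =>
      have hxs : xs = [] := List.eq_nil_of_length_eq_zero (by
        have hnil : ([] : List String).length = 0 := rfl
        omega)
      subst hxs
      have hnot : ¬ (((sol ++ [x]).length : Int) < n) := by
        simp only [List.length_append, List.length_cons, List.length_nil] at hlen ⊢
        push_cast at hlen ⊢; omega
      rw [solveLoopA, if_pos hlt]
      simp only [hx]
      rw [if_neg hnot]
      cases f with
      | zero => simp [solveLoopA, pvInterleave]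
      | succ f' =>
        rw [solveLoopA, if_neg hnot]
        simp [pvInterleave]
    | cons y ys =>
      simp only [List.length_cons] at h1 h2 hlen hfuel
      have hy : PySem.List.pyGetD nums (idx + i) "" = y := by
        have := hR 0 (by simp)
        simpa using this
      have hlt2 : (((sol ++ [x]).length : Int) < n) := by
        simp only [List.length_append, List.length_cons, List.length_nil]
        push_cast at hlen ⊢; omega
      rw [solveLoopA, if_pos hlt]
      simp only [hx]
      rw [if_pos hlt2]
      simp only [hy]
      rw [ih ys ((sol ++ [x]) ++ [y]) (i + 1) f
        (by omega) (by omega)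
        (by simp only [List.length_append, List.length_cons, List.length_nil]
            push_cast at hlen ⊢; omega)
        (by omega)
        (fun j hj => by
          have := hL (j + 1) (by simp; omega)
          have he : idx - (i + 1 + (j : Int)) = idx - (i + ((j : Nat) + 1 : Nat)) := by
            push_cast; ring
          rw [he, this]; simp)
        (fun j hj => by
          have := hR (j + 1) (by simp; omega)
          have he : idx + (i + 1 + (j : Int)) = idx + (i + ((j : Nat) + 1 : Nat)) := by
            push_cast; ring
          rw [he, this]; simp)]
      rw [pvInterleave_cons_cons]
      simp

-- B's zip-interleave plus trailing element equals the same interleave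
theorem zip_interleave (L R : List String) (acc : List String)
    (h1 : R.length ≤ L.length) (h2 : L.length ≤ R.length + 1) :
    (if R.length < L.length then
      ((L.zip R).foldl (fun acc p => acc ++ [p.1, p.2]) acc) ++ [PySem.List.pyGetD L (-1) ""]
     else (L.zip R).foldl (fun acc p => acc ++ [p.1, p.2]) acc)
    = acc ++ pvInterleave L R := by
  induction L generalizing R acc with
  | nil =>
    have hR : R = [] := by cases R <;> simp_all
    subst hR
    simp [pvInterleave_nil_nil]
  | cons x xs ih =>
    cases R with
    | nil =>
      have hxs : xs = [] := List.eq_nil_of_length_eq_zero (by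
        simp only [List.length_cons, List.length_nil] at h2; omega)
      subst hxs
      simp [PySem.List.pyGetD_neg_one ([x]) "" (by simp), pvInterleave]
    | cons y ys =>
      have hxsne : ys.length < xs.length → xs ≠ [] := by
        intro h hc; subst hc; simp at h
      have hlast : ys.length < xs.length →
          PySem.List.pyGetD (x :: xs) (-1) "" = PySem.List.pyGetD xs (-1) "" := by
        intro h
        rw [PySem.List.pyGetD_neg_one (x :: xs) "" (by simp),
            PySem.List.pyGetD_neg_one xs "" (hxsne h)]
        exact List.getLast_cons (hxsne h)
      have step : ((x :: xs).zip (y :: ys)).foldl (fun acc p => acc ++ [p.1, p.2]) acc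
          = (xs.zip ys).foldl (fun acc p => acc ++ [p.1, p.2]) (acc ++ [x, y]) := by
        simp [List.zip_cons_cons]
      by_cases hc : ys.length < xs.length
      · have hc' : (y :: ys).length < (x :: xs).length := by simpa using Nat.succ_lt_succ hc
        rw [if_pos hc', step, hlast hc]
        have := ih ys (acc ++ [x, y]) (by omega) (by simp at h2; omega)
        rw [if_pos hc] at this
        rw [this, pvInterleave_cons_cons]
        simp
      · have hc' : ¬ ((y :: ys).length < (x :: xs).length) := by simpa using hc
        rw [if_neg hc', step]
        have := ih ys (acc ++ [x, y]) (by simp at h1; omega) (by simp at h2; omega)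
        rw [if_neg hc] at this
        rw [this, pvInterleave_cons_cons]
        simp

-- ===== VERDICT (by name: the statement is the Claim_ definition above) =====
theorem solve_spec : Claim_equal_solve := by
  intro n _hDom hPre
  unfold Spec_solve solve solve_alt
  have hn : 1 ≤ n := hPre
  set m : Nat := n.toNat with hm
  have hnm : n = (m : Int) := by omega
  have hidx : PySem.Int.floordiv n 2 = ((m / 2 : Nat) : Int) := by
    rw [hnm]; exact_mod_cast PySem.Int.floordiv_natCast m 2
  set nums : List String := (PySem.List.pyRange 1 (n + 1) 1).map PySem.Int.toStr with hnums
  have hlen : nums.length = m := by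
    rw [hnums]; simp [PySem.List.length_pyRange_one]; omega
  set idxN : Nat := m / 2 with hidxN
  have hidxlt : idxN < m := by omega
  set L : List String := (nums.take idxN).reverse with hLdef
  set R : List String := nums.drop (idxN + 1) with hRdef
  have hLlen : L.length = idxN := by
    rw [hLdef]; simp; omega
  have hRlen : R.length = m - idxN - 1 := by
    rw [hRdef]; simp [hlen]; omega
  -- rewrite B's slices
  have hslice1 : (PySem.List.slice nums none (some (PySem.Int.floordiv n 2))).reverse = L := by
    rw [hidx, PySem.List.slice_to_natCast, hLdef]
  have hslice2 : PySem.List.slice nums (some (PySem.Int.floordiv n 2 + 1)) none = R := by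
    rw [hidx]
    have : ((m / 2 : Nat) : Int) + 1 = ((idxN + 1 : Nat) : Int) := by push_cast; omega
    rw [this, PySem.List.slice_from_natCast, hRdef]
  simp only [hslice1, hslice2]
  -- apply the two lemmas
  rw [solveLoopA_eq nums (PySem.Int.floordiv n 2) n L R
    [PySem.List.pyGetD nums (PySem.Int.floordiv n 2) ""] 1 n.toNat
    (by omega) (by omega)
    (by simp [hLlen, hRlen]; omega)
    (by omega)
    (fun j hj => by
      rw [hLlen] at hj
      have hidx' : PySem.Int.floordiv n 2 - (1 + (j : Int)) = ((idxN - 1 - j : Nat) : Int) := by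
        rw [hidx]; omega
      rw [hidx', PySem.List.pyGetD_natCast, hLdef]
      have ha : idxN - 1 - j < nums.length := by omega
      have hb : j < (List.take idxN nums).reverse.length := by simp [hlen]; omega
      rw [List.getD_eq_getElem _ _ ha, List.getD_eq_getElem _ _ hb]
      rw [List.getElem_reverse, List.getElem_take]
      congr 1
      simp [hlen]
      omega)
    (fun j hj => by
      rw [hRlen] at hj
      have hidx' : PySem.Int.floordiv n 2 + (1 + (j : Int)) = ((idxN + 1 + j : Nat) : Int) := by
        rw [hidx]; push_cast; omega
      rw [hidx', PySem.List.pyGetD_natCast, hRdef]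
      have ha : idxN + 1 + j < nums.length := by omega
      have hb : j < (List.drop (idxN + 1) nums).length := by simp [hlen]; omega
      rw [List.getD_eq_getElem _ _ ha, List.getD_eq_getElem _ _ hb]
      rw [List.getElem_drop])]
  rw [← zip_interleave L R _ (by omega) (by omega)]
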